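-- pv_equiv track=rewrite | github.com/pypi-data/pypi-mirror-344 | packages/vibectl/vibectl-0.5.3-py3-none-any.whl/vibectl/command_handler.py | is_api_error
-- ===== SOURCE A (Python) =====
-- def is_api_error(error_message: str) -> bool:
--     """
--     Check if an error message looks like an API error.
--
--     Args:
--         error_message: The error message to check
--
--     Returns:
--         True if the error appears to be an API error, False otherwise
--     """
--     # Check for API error formats
--     api_error_patterns = [
--         "Error executing prompt",
--         "overloaded_error",
--         "rate_limit",
--         "capacity",
--         "busy",
--         "throttle",
--         "anthropic.API",
--         "openai.API",
--         "llm error",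
--         "model unavailable",
--     ]
--
--     error_message_lower = error_message.lower()
--     return any(pattern.lower() in error_message_lower for pattern in api_error_patterns)
-- ===== SOURCE B (Python) =====
-- _API_ERROR_PATTERNS = (
--     "error executing prompt",
--     "overloaded_error",
--     "rate_limit",
--     "capacity",
--     "busy",
--     "throttle",
--     "anthropic.api",
--     "openai.api",
--     "llm error",
--     "model unavailable",
-- )
--
--
-- def is_api_error(error_message: str) -> bool:
--     """Single left-to-right scan: at each position of the lowercased message,
--     test whether any (pre-lowercased) pattern starts there."""
--     s = error_message.lower()
--     for i in range(len(s)):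
--         for p in _API_ERROR_PATTERNS:
--             if s.startswith(p, i):
--                 return True
--     return False
-- ===== Notes on version B (the rewrite author's own statement) =====
-- stated objective: alternative
-- what changed: B replaces A's pattern-major any() over k independent substring-containment searches with a single position-major scan of the lowercased message, testing at each position whether any pre-lowercased pattern starts there.
import Mathlib
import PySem

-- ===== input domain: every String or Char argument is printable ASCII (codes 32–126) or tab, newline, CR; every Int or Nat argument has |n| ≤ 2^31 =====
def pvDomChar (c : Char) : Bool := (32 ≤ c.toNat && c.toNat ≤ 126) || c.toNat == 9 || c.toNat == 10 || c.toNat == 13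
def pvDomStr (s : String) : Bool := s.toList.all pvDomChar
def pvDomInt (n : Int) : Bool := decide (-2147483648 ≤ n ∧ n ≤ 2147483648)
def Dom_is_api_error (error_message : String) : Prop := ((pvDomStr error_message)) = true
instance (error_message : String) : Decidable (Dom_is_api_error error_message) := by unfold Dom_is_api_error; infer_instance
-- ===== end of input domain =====

-- B replaces A's pattern-major any() of k substring searches by one position-major scan of the lowercased message.

-- ===== PORT A =====
def apiErrorPatterns : List String :=
  ["Error executing prompt", "overloaded_error", "rate_limit", "capacity", "busy",
   "throttle", "anthropic.API", "openai.API", "llm error", "model unavailable"]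

def is_api_error (error_message : String) : Bool :=
  let error_message_lower := PySem.Str.lower error_message
  apiErrorPatterns.any (fun pattern => PySem.Str.isIn (PySem.Str.lower pattern) error_message_lower)

-- ===== PORT B =====
def altPatterns : List (List Char) :=
  ["error executing prompt".toList, "overloaded_error".toList, "rate_limit".toList,
   "capacity".toList, "busy".toList, "throttle".toList, "anthropic.api".toList,
   "openai.api".toList, "llm error".toList, "model unavailable".toList]

-- Source B's index loop 'for i in range(len(s)): s.startswith(p, i)' as structural recursion
-- over the successive suffixes of s (startswith at i = startswith on the i-th suffix).
def altScan (s : List Char) : Bool :=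
  match s with
  | [] => false
  | c :: rest => altPatterns.any (fun p => PySem.Chars.startswith (c :: rest) p) || altScan rest

def is_api_error_alt (error_message : String) : Bool :=
  altScan (PySem.Chars.lower error_message.toList)

-- ===== PRECONDITION & SPEC =====
def Spec_is_api_error (error_message : String) (out : Bool) : Prop := out = is_api_error_alt error_message
instance (error_message : String) (out : Bool) : Decidable (Spec_is_api_error error_message out) := by unfold Spec_is_api_error; infer_instance

-- ===== CLAIM (what is proved, stated in full; the proofs are below) =====
def Claim_equal_is_api_error : Prop := ∀ (error_message : String), Dom_is_api_error error_message → Spec_is_api_error error_message (is_api_error error_message)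

-- ===== LEMMAS AND PROOFS =====

-- B's suffix scan decides "some pattern is an infix" (patterns are nonempty, so the
-- empty suffix never matters).
lemma altScan_eq_true_iff (s : List Char) :
    altScan s = true ↔ ∃ p ∈ altPatterns, p <:+: s := by
  induction s with
  | nil =>
    simp only [altScan]
    constructor
    · intro h; exact absurd h (by decide)
    · rintro ⟨p, hp, hinf⟩
      have : p = [] := List.infix_nil.mp hinf
      subst this
      revert hp; decide
  | cons c rest ih =>
    simp only [altScan, Bool.or_eq_true, List.any_eq_true, ih,
      PySem.Chars.startswith_iff, List.infix_cons_iff]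
    constructor
    · rintro (⟨p, hp, h⟩ | ⟨p, hp, h⟩)
      · exact ⟨p, hp, Or.inl h⟩
      · exact ⟨p, hp, Or.inr h⟩
    · rintro ⟨p, hp, h | h⟩
      · exact Or.inl ⟨p, hp, h⟩
      · exact Or.inr ⟨p, hp, h⟩

-- The lowered A-side patterns, viewed as char lists, are exactly B's pattern list.
lemma lowered_patterns :
    apiErrorPatterns.map (fun p => (PySem.Str.lower p).toList) = altPatterns := by
  decide

theorem is_api_error_spec : Claim_equal_is_api_error := by
  intro em _
  unfold Spec_is_api_error is_api_error is_api_error_alt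
  rw [Bool.eq_iff_iff, altScan_eq_true_iff, List.any_eq_true]
  rw [← lowered_patterns]
  simp only [List.mem_map]
  constructor
  · rintro ⟨p, hp, h⟩
    exact ⟨_, ⟨p, hp, rfl⟩, by
      have := (PySem.Str.isIn_iff_infix _ _).mp h
      simpa [PySem.Str.toList_lower] using this⟩
  · rintro ⟨q, ⟨p, hp, rfl⟩, h⟩
    refine ⟨p, hp, (PySem.Str.isIn_iff_infix _ _).mpr ?_⟩
    simpa [PySem.Str.toList_lower] using h
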